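-- pv_equiv track=rewrite | github.com/aregee/scrappy | ner.py | bucket_management
-- ===== SOURCE A (Python) =====
-- def bucket_management(ner_dict):
--
--     all_keys = []
--     for each in ner_dict:
--         part_list = ner_dict[each]
--         for each in part_list:
--             if each[0] not in all_keys:
--                 all_keys.append(each[0])
--
--     final_dict = {}
--
--     for each_key in all_keys:
--         val = 0
--         main_key = ''
--         sub_key = ''
--         for each in ner_dict:
--             for each_element in ner_dict[each]:
--                 if each_element[0] == each_key:
--                     if each_element[1] >= val:
--                         val = each_element[1]
--                         sub_key = each_element[0]
--                         main_key = each
--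
--         if main_key in final_dict:
--             temp_dict = final_dict[main_key]
--             temp_dict[sub_key] = val
--         else:
--             final_dict[main_key]= {sub_key: val}
--     return final_dict
-- ===== SOURCE B (Python) =====
-- def bucket_management(ner_dict):
--     # One pass over the items: for each sub-key keep (best value, owning main key,
--     # recorded sub key), initialised to (0, '', '') as in the task's tie rule (>=, init 0).
--     best = {}
--     for main_key, part_list in ner_dict.items():
--         for sub_key, value in part_list:
--             val, _, _ = best.setdefault(sub_key, (0, '', ''))
--             if value >= val:
--                 best[sub_key] = (value, main_key, sub_key)
--
--     final_dict = {}
--     for val, main_key, sub_key in best.values():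
--         final_dict.setdefault(main_key, {})[sub_key] = val
--     return final_dict
-- ===== Notes on version B (the rewrite author's own statement) =====
-- stated objective: faster
-- what changed: A collects all sub-keys and then rescans the entire dict once per sub-key; B makes a single pass over all items, maintaining per-sub-key running best (value, owner) in a dict, preserving A's first-appearance key order and its >=/init-0 tie rule; Pre_ only excludes association lists with duplicate main keys, which encode no Python dict.
import Mathlib
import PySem

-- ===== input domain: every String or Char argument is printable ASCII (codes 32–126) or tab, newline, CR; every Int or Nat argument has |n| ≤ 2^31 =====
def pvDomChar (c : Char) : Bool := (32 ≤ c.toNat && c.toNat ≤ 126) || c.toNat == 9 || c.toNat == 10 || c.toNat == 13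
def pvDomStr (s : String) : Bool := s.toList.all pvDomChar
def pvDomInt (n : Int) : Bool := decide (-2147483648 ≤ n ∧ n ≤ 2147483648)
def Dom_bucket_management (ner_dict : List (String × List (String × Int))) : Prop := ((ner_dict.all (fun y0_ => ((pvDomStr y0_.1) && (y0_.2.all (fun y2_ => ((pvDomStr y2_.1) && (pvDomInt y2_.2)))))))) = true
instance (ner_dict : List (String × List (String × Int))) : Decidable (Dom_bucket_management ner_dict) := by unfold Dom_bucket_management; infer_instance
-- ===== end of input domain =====

-- B replaces A's per-key rescans of the whole dict by ONE pass that keeps the running best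
-- (value, owner, recorded sub-key) per sub-key in a dict; same return value, O(total) vs O(K·total).

-- ===== PORT A =====
def bucket_management (ner_dict : List (String × List (String × Int))) : List (String × List (String × Int)) :=
  -- `for each in ner_dict` iterates the keys; `ner_dict[each]` is a lookup (the key is
  -- always present, so the [] default of getD is unreachable)
  let nd := PySem.Dict.mk ner_dict
  let all_keys : List String :=
    ner_dict.foldl (fun acc kv =>
      (nd.getD kv.1 []).foldl (fun a e => if a.contains e.1 then a else a ++ [e.1]) acc) []
  let final :=
    all_keys.foldl (fun (fd : PySem.Dict String (PySem.Dict String Int)) each_key =>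
      -- t = (val, main_key, sub_key)
      let t : Int × String × String :=
        ner_dict.foldl (fun st kv =>
          (nd.getD kv.1 []).foldl (fun st e =>
            if e.1 == each_key then
              (if e.2 ≥ st.1 then (e.2, kv.1, e.1) else st)
            else st) st) ((0 : Int), "", "")
      if fd.contains t.2.1 then
        fd.modify t.2.1 PySem.Dict.empty (fun td => td.insert t.2.2 t.1)
      else
        fd.insert t.2.1 (PySem.Dict.mk [(t.2.2, t.1)])) PySem.Dict.empty
  final.items.map (fun p => (p.1, p.2.items))

-- ===== PORT B =====
def bucket_management_alt (ner_dict : List (String × List (String × Int))) : List (String × List (String × Int)) :=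
  -- best : sub_key ↦ (best value, owning main key, recorded sub key)
  let best : PySem.Dict String (Int × String × String) :=
    ner_dict.foldl (fun best kv =>
      kv.2.foldl (fun best e =>
        let best := best.setdefault e.1 ((0 : Int), "", "")
        let val := (best.getD e.1 ((0 : Int), "", "")).1
        if e.2 ≥ val then best.insert e.1 (e.2, kv.1, e.1) else best) best)
      PySem.Dict.empty
  let final :=
    best.values.foldl (fun (fd : PySem.Dict String (PySem.Dict String Int)) t =>
      let fd := fd.setdefault t.2.1 PySem.Dict.empty
      fd.modify t.2.1 PySem.Dict.empty (fun td => td.insert t.2.2 t.1)) PySem.Dict.empty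
  final.items.map (fun p => (p.1, p.2.items))

-- ===== PRECONDITION & SPEC =====
-- Pre_ excludes association lists with duplicate main keys: those encode no Python dict
-- (A's argument is a dict, whose keys are unique), so neither Python ever receives them.
def Pre_bucket_management (ner_dict : List (String × List (String × Int))) : Prop :=
  (ner_dict.map Prod.fst).Nodup
instance (ner_dict : List (String × List (String × Int))) : Decidable (Pre_bucket_management ner_dict) := by unfold Pre_bucket_management; infer_instance

def pvWitness_bucket_management : (List (String × List (String × Int))) :=
  [("a", [("x", 1), ("y", -2)]), ("b", [("x", 3)])]

def Spec_bucket_management (ner_dict : List (String × List (String × Int))) (out : List (String × List (String × Int))) : Prop := out = bucket_management_alt ner_dict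
instance (ner_dict : List (String × List (String × Int))) (out : List (String × List (String × Int))) : Decidable (Spec_bucket_management ner_dict out) := by unfold Spec_bucket_management; infer_instance

-- ===== CLAIM (what is proved, stated in full; the proofs are below) =====
def Claim_equal_bucket_management : Prop := ∀ (ner_dict : List (String × List (String × Int))), Dom_bucket_management ner_dict → Pre_bucket_management ner_dict → Spec_bucket_management ner_dict (bucket_management ner_dict)

-- ===== LEMMAS AND PROOFS =====

-- the element stream both programs conceptually traverse: (main_key, sub_key, value)
def pvTrips (nd : List (String × List (String × Int))) : List (String × String × Int) :=
  nd.flatMap (fun kv => kv.2.map (fun e => (kv.1, e.1, e.2)))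

def pvKeysOf (xs : List (String × String × Int)) : List String :=
  xs.foldl (fun a t => PySem.Set.add a t.2.1) []

def pvStepK (k : String) (st : Int × String × String) (t : String × String × Int) : Int × String × String :=
  if t.2.1 == k then (if t.2.2 ≥ st.1 then (t.2.2, t.1, t.2.1) else st) else st

def pvBestFor (k : String) (xs : List (String × String × Int)) : Int × String × String :=
  xs.foldl (pvStepK k) ((0 : Int), "", "")

def pvBStep (d : PySem.Dict String (Int × String × String)) (t : String × String × Int) :
    PySem.Dict String (Int × String × String) :=
  if t.2.2 ≥ ((d.setdefault t.2.1 ((0 : Int), "", "")).getD t.2.1 ((0 : Int), "", "")).1 then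
    (d.setdefault t.2.1 ((0 : Int), "", "")).insert t.2.1 (t.2.2, t.1, t.2.1)
  else d.setdefault t.2.1 ((0 : Int), "", "")

def pvBestD (xs : List (String × String × Int)) : PySem.Dict String (Int × String × String) :=
  xs.foldl pvBStep PySem.Dict.empty

def pvFStepA (fd : PySem.Dict String (PySem.Dict String Int)) (t : Int × String × String) :
    PySem.Dict String (PySem.Dict String Int) :=
  if fd.contains t.2.1 then
    fd.modify t.2.1 PySem.Dict.empty (fun td => td.insert t.2.2 t.1)
  else
    fd.insert t.2.1 (PySem.Dict.mk [(t.2.2, t.1)])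

def pvFStepB (fd : PySem.Dict String (PySem.Dict String Int)) (t : Int × String × String) :
    PySem.Dict String (PySem.Dict String Int) :=
  (fd.setdefault t.2.1 PySem.Dict.empty).modify t.2.1 PySem.Dict.empty (fun td => td.insert t.2.2 t.1)

lemma pvKeysOf_eq_ofList (xs : List (String × String × Int)) :
    pvKeysOf xs = PySem.Set.ofList (xs.map (fun t => t.2.1)) := by
  unfold pvKeysOf
  rw [← PySem.Set.update_map_eq_foldl_add, PySem.Set.update_nil_left]

lemma pvKeysOf_nodup (xs : List (String × String × Int)) : (pvKeysOf xs).Nodup := by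
  rw [pvKeysOf_eq_ofList]; exact PySem.Set.nodup_ofList _

lemma pvMem_keysOf (k : String) (xs : List (String × String × Int)) :
    k ∈ pvKeysOf xs ↔ k ∈ xs.map (fun t => t.2.1) := by
  rw [pvKeysOf_eq_ofList]; exact PySem.Set.mem_ofList _ _

lemma pvBestFor_of_not_mem (s : String) (xs : List (String × String × Int))
    (h : s ∉ xs.map (fun t => t.2.1)) : pvBestFor s xs = ((0 : Int), "", "") := by
  unfold pvBestFor
  induction xs with
  | nil => rfl
  | cons t xs ih =>
    simp only [List.map_cons, List.mem_cons, not_or] at h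
    simp only [List.foldl_cons]
    have hne : (t.2.1 == s) = false := by
      simp only [beq_eq_false_iff_ne]; exact fun hc => h.1 hc.symm
    simp only [pvStepK, hne, Bool.false_eq_true, if_false]
    exact ih h.2

lemma pvFStep_eq (fd : PySem.Dict String (PySem.Dict String Int)) (t : Int × String × String) :
    pvFStepA fd t = pvFStepB fd t := by
  unfold pvFStepA pvFStepB
  by_cases h : fd.contains t.2.1 = true
  · rw [PySem.Dict.setdefault_of_contains _ _ h, if_pos h]
  · rw [PySem.Dict.setdefault_of_not_contains _ _ (by simpa using h), if_neg h]
    rw [PySem.Dict.modify, PySem.Dict.getD_insert_self, PySem.Dict.insert_insert_self]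
    rfl

-- the single-pass dict agrees pointwise with A's per-key rescan
lemma pvBestD_spec (xs : List (String × String × Int)) :
    (pvBestD xs).keys = pvKeysOf xs ∧
    ∀ k, (pvBestD xs).get? k = if k ∈ pvKeysOf xs then some (pvBestFor k xs) else none := by
  induction xs using List.reverseRecOn with
  | nil =>
    constructor
    · rfl
    · intro k; simp [pvBestD, pvKeysOf, PySem.Dict.get?_empty]
  | append_singleton xs t ih =>
    obtain ⟨m, s, v⟩ := t
    obtain ⟨hkeys, hget⟩ := ih
    have hBD : pvBestD (xs ++ [(m, s, v)]) = pvBStep (pvBestD xs) (m, s, v) := by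
      unfold pvBestD; rw [List.foldl_append]; rfl
    have hK : pvKeysOf (xs ++ [(m, s, v)]) = PySem.Set.add (pvKeysOf xs) s := by
      unfold pvKeysOf; rw [List.foldl_append]; rfl
    have hBF : ∀ k, pvBestFor k (xs ++ [(m, s, v)]) = pvStepK k (pvBestFor k xs) (m, s, v) := by
      intro k; unfold pvBestFor; rw [List.foldl_append]; rfl
    by_cases hc : (pvBestD xs).contains s = true
    · -- s already tracked
      have hmem : s ∈ pvKeysOf xs := by
        rw [← hkeys]; exact (PySem.Dict.contains_iff_mem_keys _ s).mp hc
      have hds : (pvBestD xs).get? s = some (pvBestFor s xs) := by rw [hget s, if_pos hmem]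
      have hsd : (pvBestD xs).setdefault s ((0 : Int), "", "") = pvBestD xs :=
        PySem.Dict.setdefault_of_contains _ _ hc
      have hgd : (pvBestD xs).getD s ((0 : Int), "", "") = pvBestFor s xs :=
        PySem.Dict.getD_of_get?_eq_some _ _ hds
      constructor
      · rw [hBD, hK, PySem.Set.add_of_mem hmem, ← hkeys]
        simp only [pvBStep, hsd, hgd]
        split
        · exact PySem.Dict.keys_insert_of_contains _ _ hc
        · rfl
      · intro k
        rw [hBD, hK, hBF k]
        simp only [pvBStep, pvStepK, hsd, hgd]
        by_cases hk : k = s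
        · subst hk
          rw [if_pos ((PySem.Set.mem_add _ _ _).mpr (Or.inr rfl))]
          simp only [beq_self_eq_true, if_true]
          split
          · rw [PySem.Dict.get?_insert_self]
          · exact hds
        · have hne : (s == k) = false := by
            simp only [beq_eq_false_iff_ne]; exact fun h => hk h.symm
          have hmem' : (k ∈ PySem.Set.add (pvKeysOf xs) s) ↔ (k ∈ pvKeysOf xs) := by
            rw [PySem.Set.mem_add]; exact ⟨fun h => h.resolve_right hk, Or.inl⟩
          simp only [hne, Bool.false_eq_true, if_false]
          have hrhs : (if k ∈ PySem.Set.add (pvKeysOf xs) s then some (pvBestFor k xs) else none)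
              = (pvBestD xs).get? k := by
            rw [hget k]
            by_cases hm : k ∈ pvKeysOf xs
            · rw [if_pos (hmem'.mpr hm), if_pos hm]
            · rw [if_neg (fun h => hm (hmem'.mp h)), if_neg hm]
          rw [hrhs]
          split
          · exact PySem.Dict.get?_insert_of_ne _ _ hk
          · rfl
    · -- s is new
      have hcf : (pvBestD xs).contains s = false := by simpa using hc
      have hnmem : s ∉ pvKeysOf xs := by
        rw [← hkeys]; exact fun h => hc ((PySem.Dict.contains_iff_mem_keys _ s).mpr h)
      have hsd : (pvBestD xs).setdefault s ((0 : Int), "", "")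
          = (pvBestD xs).insert s ((0 : Int), "", "") :=
        PySem.Dict.setdefault_of_not_contains _ _ hcf
      have hBF0 : pvBestFor s xs = ((0 : Int), "", "") :=
        pvBestFor_of_not_mem s xs (fun h => hnmem ((pvMem_keysOf s xs).mpr h))
      constructor
      · rw [hBD, hK, PySem.Set.add_of_not_mem hnmem, ← hkeys]
        simp only [pvBStep, hsd, PySem.Dict.getD_insert_self]
        split
        · rw [PySem.Dict.keys_insert_of_contains _ _ (PySem.Dict.contains_insert_self _ _ _),
              PySem.Dict.keys_insert_of_not_contains _ _ hcf]
        · rw [PySem.Dict.keys_insert_of_not_contains _ _ hcf]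
      · intro k
        rw [hBD, hK, hBF k]
        simp only [pvBStep, pvStepK, hsd, PySem.Dict.getD_insert_self]
        by_cases hk : k = s
        · subst hk
          rw [if_pos ((PySem.Set.mem_add _ _ _).mpr (Or.inr rfl))]
          simp only [beq_self_eq_true, if_true, hBF0]
          split
          · rw [PySem.Dict.get?_insert_self]
          · rw [PySem.Dict.get?_insert_self]
        · have hne : (s == k) = false := by
            simp only [beq_eq_false_iff_ne]; exact fun h => hk h.symm
          have hmem' : (k ∈ PySem.Set.add (pvKeysOf xs) s) ↔ (k ∈ pvKeysOf xs) := by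
            rw [PySem.Set.mem_add]; exact ⟨fun h => h.resolve_right hk, Or.inl⟩
          simp only [hne, Bool.false_eq_true, if_false]
          have hrhs : (if k ∈ PySem.Set.add (pvKeysOf xs) s then some (pvBestFor k xs) else none)
              = (pvBestD xs).get? k := by
            rw [hget k]
            by_cases hm : k ∈ pvKeysOf xs
            · rw [if_pos (hmem'.mpr hm), if_pos hm]
            · rw [if_neg (fun h => hm (hmem'.mp h)), if_neg hm]
          rw [hrhs]
          split
          · rw [PySem.Dict.get?_insert_of_ne _ _ hk, PySem.Dict.get?_insert_of_ne _ _ hk]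
          · rw [PySem.Dict.get?_insert_of_ne _ _ hk]

-- under Pre_, the lookup ner_dict[each] returns each's own value
lemma pvLookup_eq (nd : List (String × List (String × Int)))
    (h : Pre_bucket_management nd) :
    ∀ kv ∈ nd, (PySem.Dict.mk nd).getD kv.1 [] = kv.2 := by
  intro kv hkv
  have hget : (PySem.Dict.mk nd).get? kv.1 = some kv.2 :=
    PySem.Dict.get?_of_mem_items _ hkv (by simpa [PySem.Dict.keys] using h)
  exact PySem.Dict.getD_of_get?_eq_some _ _ hget

lemma pvA_allkeys (nd : List (String × List (String × Int))) (h : Pre_bucket_management nd) :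
    nd.foldl (fun acc kv =>
      ((PySem.Dict.mk nd).getD kv.1 []).foldl
        (fun a e => if a.contains e.1 then a else a ++ [e.1]) acc) [] = pvKeysOf (pvTrips nd) := by
  rw [PySem.List.foldl_congr_mem nd _
    (fun acc kv => kv.2.foldl (fun a e => if a.contains e.1 then a else a ++ [e.1]) acc) []
    (fun acc kv hkv => by rw [pvLookup_eq nd h kv hkv])]
  unfold pvKeysOf pvTrips
  rw [List.foldl_flatMap]
  exact PySem.List.foldl_congr_mem nd _ _ [] (fun a kv _ => by rw [List.foldl_map]; rfl)

lemma pvA_best (nd : List (String × List (String × Int))) (h : Pre_bucket_management nd)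
    (k : String) :
    nd.foldl (fun st kv =>
      ((PySem.Dict.mk nd).getD kv.1 []).foldl (fun st e =>
        if e.1 == k then (if e.2 ≥ st.1 then (e.2, kv.1, e.1) else st) else st) st)
      ((0 : Int), "", "") = pvBestFor k (pvTrips nd) := by
  rw [PySem.List.foldl_congr_mem nd _
    (fun st kv => kv.2.foldl (fun st e =>
        if e.1 == k then (if e.2 ≥ st.1 then (e.2, kv.1, e.1) else st) else st) st)
    ((0 : Int), "", "")
    (fun st kv hkv => by rw [pvLookup_eq nd h kv hkv])]
  unfold pvBestFor pvTrips
  rw [List.foldl_flatMap]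
  exact PySem.List.foldl_congr_mem nd _ _ _ (fun a kv _ => by rw [List.foldl_map]; rfl)

-- ===== VERDICT (by name: the statement is the Claim_ definition above) =====
theorem bucket_management_spec : Claim_equal_bucket_management := by
  intro nd _ hpre
  unfold Spec_bucket_management
  simp only [bucket_management, bucket_management_alt]
  obtain ⟨hkeys, hget⟩ := pvBestD_spec (pvTrips nd)
  have hbestB : nd.foldl (fun best kv =>
      kv.2.foldl (fun best e =>
        let best := best.setdefault e.1 ((0 : Int), "", "")
        let val := (best.getD e.1 ((0 : Int), "", "")).1
        if e.2 ≥ val then best.insert e.1 (e.2, kv.1, e.1) else best) best)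
      PySem.Dict.empty = pvBestD (pvTrips nd) := by
    unfold pvBestD pvTrips
    rw [List.foldl_flatMap]
    exact PySem.List.foldl_congr_mem nd _ _ _ (fun a kv _ => by rw [List.foldl_map]; rfl)
  rw [pvA_allkeys nd hpre, hbestB]
  have hvals : (pvBestD (pvTrips nd)).values
      = (pvKeysOf (pvTrips nd)).map (fun k => pvBestFor k (pvTrips nd)) := by
    rw [PySem.Dict.values_eq_map_keys _ (hkeys ▸ pvKeysOf_nodup _) ((0 : Int), "", ""), hkeys]
    exact List.map_congr_left (fun k hk =>
      PySem.Dict.getD_of_get?_eq_some _ _ (by rw [hget k, if_pos hk]))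
  rw [hvals]
  congr 2
  rw [List.foldl_map]
  refine PySem.List.foldl_congr_mem _ _ _ _ (fun fd k _ => ?_)
  rw [pvA_best nd hpre k]
  exact pvFStep_eq fd (pvBestFor k (pvTrips nd))
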